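-- pv_equiv track=rewrite | github.com/ASSERT-KTH/Mokav | experiments/pynguin/c4b/single-return/generated_tests/src_528/9/src_528.py | func
-- ===== SOURCE A (Python) =====
-- def func(*args):
--
-- 	n = int(args[0])
-- 	r = 1
-- 	while ((r * 5) < n):
-- 	    n -= (r * 5)
-- 	    r *= 2
-- 	names = ('Sheldon', 'Leonard', 'Penny', 'Rajesh', 'Howard')
-- 	return(names[int(((n - 1) / r))])
-- ===== SOURCE B (Python) =====
-- def func(*args):
--     n = int(args[0])
--     names = ('Sheldon', 'Leonard', 'Penny', 'Rajesh', 'Howard')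
--     if n <= 5:
--         return names[n - 1]
--     m = (n + 14) // 10            # = ceil((n+5)/10)
--     r = 1 << (m - 1).bit_length() # smallest power of two >= m, i.e. with 5*(2r-1) >= n
--     return names[(n - 5 * (r - 1) - 1) // r]
-- ===== Notes on version B (the rewrite author's own statement) =====
-- stated objective: simpler
-- what changed: Replaces the subtract-and-double while loop with a closed-form bracket: the group's power of two r is computed directly via bit_length of the ceiling division (n+14)//10, then a single floor-division picks the name.
import Mathlib
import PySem

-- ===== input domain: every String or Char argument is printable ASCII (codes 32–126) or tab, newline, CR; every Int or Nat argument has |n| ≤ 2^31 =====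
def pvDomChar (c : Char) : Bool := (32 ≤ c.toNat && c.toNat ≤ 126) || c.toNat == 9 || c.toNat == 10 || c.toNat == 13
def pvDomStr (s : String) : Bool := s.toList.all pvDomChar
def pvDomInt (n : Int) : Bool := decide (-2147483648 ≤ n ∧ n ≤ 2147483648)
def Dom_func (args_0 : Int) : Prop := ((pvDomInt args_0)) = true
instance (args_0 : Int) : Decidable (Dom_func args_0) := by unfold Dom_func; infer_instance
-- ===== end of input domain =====

-- B replaces A's subtract-and-double loop with a closed-form power-of-two bracket (objective: simpler).

-- ===== PORT A =====
-- A's while loop: while r*5 < n: n -= r*5; r *= 2.  The '0 < r' conjunct is a pure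
-- totality guard (r starts at 1 and only doubles, so it always holds on A's calls).
def funcLoop (n r : Int) : Int × Int :=
  if h : 0 < r ∧ r * 5 < n then funcLoop (n - r * 5) (r * 2) else (n, r)
  termination_by n.toNat
  decreasing_by omega

def funcNames : List String := ["Sheldon", "Leonard", "Penny", "Rajesh", "Howard"]

-- int((n-1)/r): the float division is exact here (r a power of two, |n-1| < 2^53)
-- and int() truncates toward zero, i.e. Int.tdiv.  On out-of-range index Python
-- raises IndexError (excluded by Pre_), here .getD "".
def func (args_0 : Int) : String :=
  let p := funcLoop args_0 1
  (PySem.List.pyGet? funcNames (Int.tdiv (p.1 - 1) p.2)).getD ""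

-- ===== PORT B =====
def func_alt (args_0 : Int) : String :=
  let n := args_0
  if n ≤ 5 then (PySem.List.pyGet? funcNames (n - 1)).getD ""
  else
    let m := PySem.Int.floordiv (n + 14) 10
    -- 1 << (m-1).bit_length() : for m-1 ≥ 1, bit_length = Nat.log2 + 1
    let r : Int := 2 ^ ((m - 1).toNat.log2 + 1)
    (PySem.List.pyGet? funcNames (PySem.Int.floordiv (n - 5 * (r - 1) - 1) r)).getD ""

-- ===== PRECONDITION & SPEC =====
-- Pre_ excludes exactly n ≤ -5, where A (and B) raise IndexError on the names lookup.
def Pre_func (args_0 : Int) : Prop := -4 ≤ args_0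
instance (args_0 : Int) : Decidable (Pre_func args_0) := by unfold Pre_func; infer_instance
def pvWitness_func : Int := (6)

def Spec_func (args_0 : Int) (out : String) : Prop := out = func_alt args_0
instance (args_0 : Int) (out : String) : Decidable (Spec_func args_0 out) := by unfold Spec_func; infer_instance

-- ===== CLAIM (what is proved, stated in full; the proofs are below) =====
def Claim_equal_func : Prop := ∀ (args_0 : Int), Dom_func args_0 → Pre_func args_0 → Spec_func args_0 (func args_0)

-- ===== LEMMAS AND PROOFS =====

-- Characterization of A's loop: starting from (n, r) with 0 < r, the final state
-- (n', r') has r' = 2^j * r, n' = n - 5*(r' - r), exit bound n' ≤ 5*r', and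
-- minimality: either no step was taken (r' = r) or 5*(r' - r) < n.
theorem funcLoop_spec (n r : Int) (hr : 0 < r) :
    ∃ j : ℕ, (funcLoop n r).2 = 2 ^ j * r ∧
      (funcLoop n r).1 = n - 5 * ((funcLoop n r).2 - r) ∧
      (funcLoop n r).1 ≤ 5 * (funcLoop n r).2 ∧
      ((funcLoop n r).2 = r ∨ 5 * ((funcLoop n r).2 - r) < n) := by
  induction n, r using funcLoop.induct with
  | case1 n r h ih =>
    rcases ih (mul_pos h.1 (by norm_num)) with ⟨j, h1, h2, h3, h4⟩
    rw [funcLoop, dif_pos h]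
    refine ⟨j + 1, by rw [h1]; ring, by rw [h2, h1]; ring, by omega, ?_⟩
    rcases h4 with h4 | h4
    · right; rw [h4]; nlinarith [h.1, h.2]
    · right; omega
  | case2 n r h =>
    rw [funcLoop, dif_neg h]
    exact ⟨0, by ring, by ring, by simp at h; nlinarith [h hr], Or.inl rfl⟩

-- Uniqueness of the power-of-two bracket 5*(r-1) < n ≤ 5*(2r-1).
theorem bracket_unique (n : Int) (a b : ℕ)
    (ha1 : 5 * ((2:Int) ^ a - 1) < n) (ha2 : n ≤ 5 * (2 * 2 ^ a - 1))
    (hb1 : 5 * ((2:Int) ^ b - 1) < n) (hb2 : n ≤ 5 * (2 * 2 ^ b - 1)) : a = b := by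
  by_contra hne
  rcases Nat.lt_or_lt_of_ne hne with h | h
  · have : (2:Int) * 2 ^ a ≤ 2 ^ b := by
      calc (2:Int) * 2 ^ a = 2 ^ (a + 1) := by ring
        _ ≤ 2 ^ b := by exact_mod_cast Nat.pow_le_pow_right (by norm_num) h
    omega
  · have : (2:Int) * 2 ^ b ≤ 2 ^ a := by
      calc (2:Int) * 2 ^ b = 2 ^ (b + 1) := by ring
        _ ≤ 2 ^ a := by exact_mod_cast Nat.pow_le_pow_right (by norm_num) h
    omega

theorem func_alt_bracket (n : Int) (hn : 5 < n) :
    5 * ((2:Int) ^ (((PySem.Int.floordiv (n + 14) 10 - 1).toNat.log2) + 1) - 1) < n ∧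
    n ≤ 5 * (2 * (2:Int) ^ (((PySem.Int.floordiv (n + 14) 10 - 1).toNat.log2) + 1) - 1) := by
  set m := PySem.Int.floordiv (n + 14) 10 with hm
  have hdiv : m * 10 ≤ n + 14 ∧ n + 14 < (m + 1) * 10 := by
    have := (PySem.Int.floordiv_eq_iff_of_pos (a := n + 14) (b := 10) (q := m) (by norm_num)).mp hm.symm
    exact this
  have hm2 : 2 ≤ m := by omega
  set M := (m - 1).toNat with hM
  have hM1 : 1 ≤ M := by omega
  have hlo : (2:ℕ) ^ M.log2 ≤ M := Nat.log2_self_le (by omega)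
  have hhi : M < (2:ℕ) ^ (M.log2 + 1) := Nat.lt_log2_self
  have hloZ : (2:Int) ^ M.log2 ≤ (M : Int) := by exact_mod_cast hlo
  have hhiZ : ((M : Int)) < 2 ^ (M.log2 + 1) := by exact_mod_cast hhi
  have hMm : (M : Int) = m - 1 := by omega
  constructor
  · -- 5*(r-1) < n  where r = 2^(log2 M + 1) ≤ 2*M = 2*(m-1)
    have : (2:Int) ^ (M.log2 + 1) = 2 * 2 ^ M.log2 := by ring
    nlinarith
  · -- n ≤ 5*(2r-1) ⇔ n+5 ≤ 10r; r = 2^(log2 M +1) > M = m-1 so r ≥ m, 10m ≥ n+5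
    nlinarith

-- ===== VERDICT (by name: the statement is the Claim_ definition above) =====
theorem func_spec : Claim_equal_func := by
  intro n _ hpre
  unfold Spec_func func func_alt
  rcases funcLoop_spec n 1 one_pos with ⟨j, h1, h2, h3, h4⟩
  by_cases h5 : n ≤ 5
  · -- loop does not run; both index names[n-1]
    have : funcLoop n 1 = (n, 1) := by rw [funcLoop, dif_neg (by omega)]
    simp only [this, if_pos h5]
    norm_num [Int.tdiv_one]
  · -- loop runs; A's final r is the unique bracket power, same as B's
    simp only [if_neg h5]
    have hrpos : (0:Int) < (funcLoop n 1).2 := by rw [h1]; positivity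
    -- A's bracket: 5*(2^j - 1) < n ≤ 5*(2*2^j - 1)
    have hA1 : 5 * ((2:Int) ^ j - 1) < n := by
      rcases h4 with h4 | h4
      · have : (2:Int) ^ j = 1 := by omega
        simp [this]; omega
      · rw [h1] at h4; omega
    have hA2 : n ≤ 5 * (2 * (2:Int) ^ j - 1) := by rw [h1] at h3 h2; omega
    set L := ((PySem.Int.floordiv (n + 14) 10 - 1).toNat.log2) + 1 with hL
    obtain ⟨hB1, hB2⟩ := func_alt_bracket n (by omega)
    have hj : j = L := bracket_unique n j L hA1 hA2 hB1 hB2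
    have hr : (funcLoop n 1).2 = 2 ^ L := by rw [h1, hj]; ring
    have hn' : (funcLoop n 1).1 = n - 5 * (2 ^ L - 1) := by rw [h2, hr]
    have hpos : 1 ≤ (funcLoop n 1).1 := by
      rcases h4 with h4 | h4
      · rw [h2, h4]; omega
      · omega
    rw [hn', hr]
    -- nonnegative dividend, positive divisor: tdiv = floordiv
    have heq : Int.tdiv (n - 5 * (2 ^ L - 1) - 1) (2 ^ L) =
        PySem.Int.floordiv (n - 5 * (2 ^ L - 1) - 1) (2 ^ L) := by
      rw [PySem.Int.floordiv_eq_ediv_of_pos (by positivity),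
        Int.tdiv_eq_ediv_of_nonneg (by omega)]
    rw [heq]
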